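-- pv_equiv track=rewrite | github.com/ucb-bar/merlin | benchmarks/SpacemiTX60/baseline_dual_model_async/run_benchmark_remote.py | extract_csv
-- ===== SOURCE A (Python) =====
-- from typing import Dict, List, Optional, Tuple
--
-- def extract_csv(output_text: str) -> Tuple[Optional[List[str]], Optional[List[str]]]:
--     header = None
--     row = None
--     for line in output_text.splitlines():
--         line = line.strip()
--         if line.startswith("CSV_HEADER,"):
--             header = line[len("CSV_HEADER,"):].split(",")
--         elif line.startswith("CSV_ROW,"):
--             row = line[len("CSV_ROW,"):].split(",")
--     return header, row
-- ===== SOURCE B (Python) =====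
-- def extract_csv(output_text):
--     header = None
--     row = None
--     for line in reversed(output_text.splitlines()):
--         s = line.strip()
--         if header is None and s.startswith("CSV_HEADER,"):
--             header = s[len("CSV_HEADER,"):].split(",")
--         elif row is None and s.startswith("CSV_ROW,"):
--             row = s[len("CSV_ROW,"):].split(",")
--         if header is not None and row is not None:
--             break
--     return header, row
-- ===== Notes on version B (the rewrite author's own statement) =====
-- stated objective: alternative
-- what changed: Forward pass that overwrites header/row on every match is replaced by a reverse scan that fills each slot at most once and breaks as soon as both are found.
import Mathlib
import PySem

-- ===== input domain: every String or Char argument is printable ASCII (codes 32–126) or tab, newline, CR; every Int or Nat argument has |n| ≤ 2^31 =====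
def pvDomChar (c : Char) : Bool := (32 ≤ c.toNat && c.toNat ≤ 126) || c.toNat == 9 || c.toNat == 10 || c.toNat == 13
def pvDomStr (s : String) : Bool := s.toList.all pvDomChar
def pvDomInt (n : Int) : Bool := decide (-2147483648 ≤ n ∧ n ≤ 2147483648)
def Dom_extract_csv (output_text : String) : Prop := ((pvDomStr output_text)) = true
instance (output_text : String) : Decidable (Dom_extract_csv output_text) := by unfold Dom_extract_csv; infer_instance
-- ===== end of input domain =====

-- B replaces A's forward overwrite pass by a reverse scan that fills each slot once and stops early (alternative decomposition, same cost).


-- payload helper shared by both Pythons: line[n:].split(",")  (split? is total here: "," ≠ "")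
def pvPayload (s : String) (n : Int) : List String :=
  (PySem.Str.split? (PySem.Str.slice s (some n) none) ",").getD []

-- ===== PORT A =====
def extract_csv (output_text : String) : Option (List String) × Option (List String) :=
  (PySem.Str.splitlines output_text).foldl
    (fun st line =>
      let s := PySem.Str.strip line
      if PySem.Str.startswith s "CSV_HEADER," then
        (some (pvPayload s 11), st.2)
      else if PySem.Str.startswith s "CSV_ROW," then
        (st.1, some (pvPayload s 8))
      else st)
    (none, none)

-- ===== PORT B =====
def pvRevScan : List String → Option (List String) → Option (List String) →
    Option (List String) × Option (List String)
  | [], h, r => (h, r)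
  | line :: rest, h, r =>
    let s := PySem.Str.strip line
    let p :=
      if h.isNone && PySem.Str.startswith s "CSV_HEADER," then
        (some (pvPayload s 11), r)
      else if r.isNone && PySem.Str.startswith s "CSV_ROW," then
        (h, some (pvPayload s 8))
      else (h, r)
    if p.1.isSome && p.2.isSome then p else pvRevScan rest p.1 p.2

def extract_csv_alt (output_text : String) : Option (List String) × Option (List String) :=
  pvRevScan (PySem.Str.splitlines output_text).reverse none none

-- ===== PRECONDITION & SPEC =====
def Spec_extract_csv (output_text : String) (out : Option (List String) × Option (List String)) : Prop := out = extract_csv_alt output_text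
instance (output_text : String) (out : Option (List String) × Option (List String)) : Decidable (Spec_extract_csv output_text out) := by unfold Spec_extract_csv; infer_instance

-- ===== CLAIM (what is proved, stated in full; the proofs are below) =====
def Claim_equal_extract_csv : Prop := ∀ (output_text : String), Dom_extract_csv output_text → Spec_extract_csv output_text (extract_csv output_text)

-- ===== LEMMAS AND PROOFS =====

-- first line of L whose strip starts with `pre`, mapped to its payload at offset n
def pvHit (pre : String) (n : Int) (L : List String) : Option (List String) :=
  (L.find? (fun l => PySem.Str.startswith (PySem.Str.strip l) pre)).map
    (fun l => pvPayload (PySem.Str.strip l) n)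

theorem pvExcl (s : String)
    (h : PySem.Str.startswith s "CSV_HEADER," = true) :
    PySem.Str.startswith s "CSV_ROW," = false := by
  by_contra hr
  rw [Bool.not_eq_false] at hr
  rw [PySem.Str.startswith_eq, PySem.Chars.startswith_iff] at h hr
  rcases List.prefix_or_prefix_of_prefix h hr with hc | hc <;> revert hc <;> decide

theorem pvHit_append (pre : String) (n : Int) (L M : List String) :
    pvHit pre n (L ++ M) = (pvHit pre n L).or (pvHit pre n M) := by
  simp only [pvHit, List.find?_append]
  cases L.find? (fun l => PySem.Str.startswith (PySem.Str.strip l) pre) <;> simp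

theorem pvHit_cons (pre : String) (n : Int) (x : String) (L : List String) :
    pvHit pre n (x :: L)
    = if PySem.Str.startswith (PySem.Str.strip x) pre then
        some (pvPayload (PySem.Str.strip x) n)
      else pvHit pre n L := by
  by_cases hx : PySem.Str.startswith (PySem.Str.strip x) pre = true <;>
    simp only [PySem.Str.startswith_eq, PySem.Str.toList_strip] at hx <;>
    simp [pvHit, List.find?_cons, hx]

theorem pvHit_nil (pre : String) (n : Int) : pvHit pre n [] = none := rfl

theorem pvFoldA (L : List String) (h r : Option (List String)) :
    L.foldl
      (fun st line =>
        let s := PySem.Str.strip line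
        if PySem.Str.startswith s "CSV_HEADER," then
          (some (pvPayload s 11), st.2)
        else if PySem.Str.startswith s "CSV_ROW," then
          (st.1, some (pvPayload s 8))
        else st)
      (h, r)
    = ((pvHit "CSV_HEADER," 11 L.reverse).or h, (pvHit "CSV_ROW," 8 L.reverse).or r) := by
  induction L generalizing h r with
  | nil => simp [pvHit]
  | cons x L ih =>
    rcases Bool.eq_false_or_eq_true (PySem.Str.startswith (PySem.Str.strip x) "CSV_HEADER,")
      with h1 | h1
    · have h2 := pvExcl _ h1
      simp only [List.foldl_cons, List.reverse_cons, pvHit_append, pvHit_cons, pvHit_nil,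
        h1, h2, reduceIte]
      rw [ih]
      simp [Option.or_assoc]
    · rcases Bool.eq_false_or_eq_true (PySem.Str.startswith (PySem.Str.strip x) "CSV_ROW,")
        with h2 | h2 <;>
      · simp only [List.foldl_cons, List.reverse_cons, pvHit_append, pvHit_cons, pvHit_nil,
          h1, h2, reduceIte]
        rw [ih]
        simp [Option.or_assoc]

theorem pvRevScan_eq (L : List String) (h r : Option (List String)) :
    pvRevScan L h r = (h.or (pvHit "CSV_HEADER," 11 L), r.or (pvHit "CSV_ROW," 8 L)) := by
  induction L generalizing h r with
  | nil => simp [pvRevScan, pvHit]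
  | cons x L ih =>
    rw [pvRevScan]
    rcases Bool.eq_false_or_eq_true (PySem.Str.startswith (PySem.Str.strip x) "CSV_HEADER,")
      with h1 | h1
    · have h2 := pvExcl _ h1
      cases h <;> cases r <;>
      · simp only [pvHit_cons, pvHit_nil, h1, h2, Option.isNone_none, Option.isNone_some,
          Bool.true_and, Bool.false_and, reduceIte]
        simp [ih, Option.or_assoc]
    · rcases Bool.eq_false_or_eq_true (PySem.Str.startswith (PySem.Str.strip x) "CSV_ROW,")
        with h2 | h2 <;>
      · cases h <;> cases r <;>
        · simp only [pvHit_cons, pvHit_nil, h1, h2, Option.isNone_none, Option.isNone_some,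
            Bool.true_and, Bool.false_and, reduceIte]
          simp [ih, Option.or_assoc]

-- ===== VERDICT (by name: the statement is the Claim_ definition above) =====
theorem extract_csv_spec : Claim_equal_extract_csv := by
  intro t _
  show extract_csv t = extract_csv_alt t
  rw [extract_csv, extract_csv_alt, pvFoldA, pvRevScan_eq]
  simp
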